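-- pv_equiv track=rewrite | github.com/DanyalAbbas/vjudge-practice | Contest 5/k.py | foo
-- ===== SOURCE A (Python) =====
-- def foo(arr : list[int]):
--     l = [0,0]
--     choice = False
--     for i in range(len(arr)):
--         l[choice] += max(arr)
--         arr.remove(max(arr))
--         choice = not(choice)
--     return l
-- ===== SOURCE B (Python) =====
-- def foo(arr : list[int]):
--     piles = [0, 0]
--     for i, x in enumerate(sorted(arr, reverse=True)):
--         piles[i % 2] += x
--     return piles
-- ===== Notes on version B (the rewrite author's own statement) =====
-- stated objective: faster
-- what changed: Replaces the quadratic repeated max()-scan-and-remove loop by one descending sort followed by a single enumerate pass that adds each element to pile i%2.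
import Mathlib
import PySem

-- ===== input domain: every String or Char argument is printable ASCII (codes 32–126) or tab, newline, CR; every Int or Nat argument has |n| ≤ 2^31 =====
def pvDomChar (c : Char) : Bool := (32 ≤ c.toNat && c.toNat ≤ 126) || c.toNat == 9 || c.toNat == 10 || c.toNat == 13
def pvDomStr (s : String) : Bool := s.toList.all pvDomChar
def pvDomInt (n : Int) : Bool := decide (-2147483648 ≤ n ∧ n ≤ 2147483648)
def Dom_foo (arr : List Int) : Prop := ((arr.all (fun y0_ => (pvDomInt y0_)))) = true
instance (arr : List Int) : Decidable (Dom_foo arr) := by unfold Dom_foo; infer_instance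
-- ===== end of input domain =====

-- B replaces A's quadratic repeated max()-scan-and-remove loop by one descending sort and a
-- single enumerate pass (faster). A empties arr in place; B does not mutate arr — the
-- equivalence proved here is about the return value only.

-- ===== PORT A =====
-- loop body of A: l[choice] += max(arr); arr.remove(max(arr)); choice = not choice
-- (max() on an empty list raises; the loop runs exactly len(arr) times, so the `none`
--  branch is unreachable — the state is returned unchanged there)
def fooStep (s : List Int × Int × Int × Bool) : List Int × Int × Int × Bool :=
  match PySem.List.max? s.1 (fun x => x) with
  | none => s
  | some m =>
      ((PySem.List.remove? s.1 m).getD s.1,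
       (if s.2.2.2 then s.2.1 else s.2.1 + m),
       (if s.2.2.2 then s.2.2.1 + m else s.2.2.1),
       !s.2.2.2)

def foo (arr : List Int) : List Int :=
  let st := (List.range arr.length).foldl (fun s _ => fooStep s) (arr, 0, 0, false)
  [st.2.1, st.2.2.1]

-- ===== PORT B =====
def foo_alt (arr : List Int) : List Int :=
  let piles := (PySem.List.enumerate (PySem.List.sorted arr (fun x => x) true)).foldl
    (fun (p : Int × Int) ix =>
      if PySem.Int.mod ix.1 2 == 0 then (p.1 + ix.2, p.2) else (p.1, p.2 + ix.2))
    (0, 0)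
  [piles.1, piles.2]

-- ===== PRECONDITION & SPEC =====
def Spec_foo (arr : List Int) (out : List Int) : Prop := out = foo_alt arr
instance (arr : List Int) (out : List Int) : Decidable (Spec_foo arr out) := by unfold Spec_foo; infer_instance

-- ===== CLAIM (what is proved, stated in full; the proofs are below) =====
def Claim_equal_foo : Prop := ∀ (arr : List Int), Dom_foo arr → Spec_foo arr (foo arr)

-- ===== LEMMAS AND PROOFS =====

-- alternating sums of a list: (sum of even-indexed, sum of odd-indexed)
def altSums : List Int → Int × Int
  | [] => (0, 0)
  | x :: t => (x + (altSums t).2, (altSums t).1)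

-- a foldl whose body ignores the element is an iterate
theorem foldl_const_iterate {α β : Type} (g : α → α) :
    ∀ (l : List β) (s : α), l.foldl (fun s _ => g s) s = g^[l.length] s := by
  intro l
  induction l with
  | nil => intro s; rfl
  | cons x t ih =>
      intro s
      simp [List.foldl_cons, ih, Function.iterate_succ_apply]

-- the descending sort of a nonempty list is (first) max :: descending sort of the rest
theorem sorted_desc_cons (a : List Int) (m : Int)
    (h : PySem.List.max? a (fun x => x) = some m) :
    PySem.List.sorted a (fun x => x) true =
      m :: PySem.List.sorted (a.erase m) (fun x => x) true := by
  have hm : m ∈ a := PySem.List.max?_mem h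
  apply PySem.List.eq_of_perm_of_pairwise_le_of_injective (fun x : Int => -x)
    (fun x y hxy => by simpa using hxy)
  · exact (PySem.List.sorted_perm a _ true).trans
      ((List.perm_cons_erase hm).trans
        (List.Perm.cons m (PySem.List.sorted_perm (a.erase m) _ true).symm))
  · have := PySem.List.sorted_pairwise_rev a (fun x : Int => x)
    exact this.imp (by intro x y hxy; simpa using hxy)
  · constructor
    · intro y hy
      have : y ∈ a := List.mem_of_mem_erase ((PySem.List.mem_sorted _ _ _ y).1 hy)
      have := PySem.List.max?_isMax h y this
      simpa using this
    · have := PySem.List.sorted_pairwise_rev (a.erase m) (fun x : Int => x)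
      exact this.imp (by intro x y hxy; simpa using hxy)

-- B's enumerate loop computes altSums of the traversed list, placed by the parity of the start index
theorem enumFold (s : List Int) :
    ∀ (k : Nat) (a b : Int),
      (PySem.List.enumerate s (k : Int)).foldl
        (fun (p : Int × Int) ix =>
          if PySem.Int.mod ix.1 2 == 0 then (p.1 + ix.2, p.2) else (p.1, p.2 + ix.2))
        (a, b)
      = if k % 2 = 0 then (a + (altSums s).1, b + (altSums s).2)
        else (a + (altSums s).2, b + (altSums s).1) := by
  induction s with
  | nil => intro k a b; simp [PySem.List.enumerate, altSums]
  | cons x t ih =>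
      intro k a b
      rw [PySem.List.enumerate_cons]
      have hk1 : ((k : Int) + 1) = ((k + 1 : Nat) : Int) := by push_cast; ring
      rw [List.foldl_cons]
      have hmod : PySem.Int.mod (k : Int) 2 = ((k % 2 : Nat) : Int) :=
        PySem.Int.mod_natCast k 2
      rcases Nat.even_or_odd k with he | ho
      · have h0 : k % 2 = 0 := Nat.even_iff.1 he
        have h1 : (k + 1) % 2 = 1 := by omega
        simp only [hmod, h0, hk1]
        rw [ih (k + 1)]
        simp [altSums, h1, add_assoc]
      · have h0 : k % 2 = 1 := Nat.odd_iff.1 ho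
        have h1 : (k + 1) % 2 = 0 := by omega
        simp only [hmod, h0, hk1]
        rw [ih (k + 1)]
        simp [altSums, h1, add_assoc]

-- A's loop, iterated length-many times, drains the list and accumulates the alternating
-- sums of its descending sort into the two piles (swapped when starting with choice = true)
theorem fooStep_iterate :
    ∀ (n : Nat) (a : List Int) (l0 l1 : Int) (ch : Bool), a.length = n →
      fooStep^[n] (a, l0, l1, ch) =
        ([],
         l0 + (if ch then (altSums (PySem.List.sorted a (fun x => x) true)).2
               else (altSums (PySem.List.sorted a (fun x => x) true)).1),
         l1 + (if ch then (altSums (PySem.List.sorted a (fun x => x) true)).1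
               else (altSums (PySem.List.sorted a (fun x => x) true)).2),
         if n % 2 = 0 then ch else !ch) := by
  intro n
  induction n with
  | zero =>
      intro a l0 l1 ch h
      have : a = [] := List.length_eq_zero_iff.1 h
      subst this
      simp [PySem.List.sorted, altSums]
  | succ n ih =>
      intro a l0 l1 ch h
      have hne : a ≠ [] := by intro hn; subst hn; simp at h
      obtain ⟨m, hm⟩ : ∃ m, PySem.List.max? a (fun x => x) = some m := by
        cases hmx : PySem.List.max? a (fun x => x) with
        | none => exact absurd ((PySem.List.max?_eq_none_iff a _).1 hmx) hne
        | some m => exact ⟨m, rfl⟩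
      have hmem : m ∈ a := PySem.List.max?_mem hm
      have hrem : PySem.List.remove? a m = some (a.erase m) :=
        PySem.List.remove?_eq_some_erase a m hmem
      have hlen : (a.erase m).length = n := by
        have := List.length_erase_of_mem hmem; omega
      have hstep : fooStep (a, l0, l1, ch) =
          (a.erase m, (if ch then l0 else l0 + m), (if ch then l1 + m else l1), !ch) := by
        simp [fooStep, hm, hrem]
      rw [Function.iterate_succ_apply, hstep,
        ih (a.erase m) _ _ (!ch) hlen, sorted_desc_cons a m hm]
      cases ch <;> simp [altSums] <;>
        exact ⟨by ring, by by_cases hn : n % 2 = 0 <;> simp [hn] <;> omega⟩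

-- ===== VERDICT (by name: the statement is the Claim_ definition above) =====
theorem foo_spec : Claim_equal_foo := by
  intro arr _
  unfold Spec_foo foo foo_alt
  rw [foldl_const_iterate]
  simp only [List.length_range]
  rw [fooStep_iterate arr.length arr 0 0 false rfl]
  have hB := enumFold (PySem.List.sorted arr (fun x => x) true) 0 0 0
  simp only [Nat.cast_zero] at hB
  rw [hB]
  simp
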